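-- pv_equiv track=rewrite | github.com/2SOOY/problem-solving | boj_주유소.py | solution
-- ===== SOURCE A (Python) =====
-- def solution(N, distances, prices):
--     answer = 0
--
--     if N == 2:
--         return distances[0] * prices[0]
--
--     min_price = max(prices[:-1]) # 현재 기준 가장 낮은 주유소의 가격
--
--     for i in range(N - 1):
--         dist = distances[i] # 다음 주유소 이동할 거리
--         price = prices[i]   # 현재 주유소 가격
--
--         # 현재 기준으로 가격이 더 낮은 주유소 등장 시 최저가 갱신
--         if price <= min_price:
--             min_price = price
--
--         answer += (dist * min_price) # 최저가를 기준으로 계산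
--
--     return answer
-- ===== SOURCE B (Python) =====
-- def solution(N, distances, prices):
--     # Segment attribution: visit stations cheapest-first; each new "record"
--     # (a station left of every cheaper one) pays for the whole stretch of
--     # road from itself up to the previous record.
--     legs = N - 1 if N > 1 else 0
--     ds = distances[:legs]
--     total = 0
--     frontier = legs
--     for i in sorted(range(legs), key=lambda i: prices[i]):
--         if i < frontier:
--             total += prices[i] * sum(ds[i:frontier])
--             frontier = i
--     return total
-- ===== Notes on version B (the rewrite author's own statement) =====
-- stated objective: alternative
-- what changed: A's fused left-to-right running-minimum loop (with an N==2 special case and a max(prices[:-1]) initializer) is replaced by a sort-based segment algorithm: visit the stations cheapest-first, and each station that lies left of every cheaper one (a record) pays its price for the whole stretch of road from itself up to the previous record.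
import Mathlib
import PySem

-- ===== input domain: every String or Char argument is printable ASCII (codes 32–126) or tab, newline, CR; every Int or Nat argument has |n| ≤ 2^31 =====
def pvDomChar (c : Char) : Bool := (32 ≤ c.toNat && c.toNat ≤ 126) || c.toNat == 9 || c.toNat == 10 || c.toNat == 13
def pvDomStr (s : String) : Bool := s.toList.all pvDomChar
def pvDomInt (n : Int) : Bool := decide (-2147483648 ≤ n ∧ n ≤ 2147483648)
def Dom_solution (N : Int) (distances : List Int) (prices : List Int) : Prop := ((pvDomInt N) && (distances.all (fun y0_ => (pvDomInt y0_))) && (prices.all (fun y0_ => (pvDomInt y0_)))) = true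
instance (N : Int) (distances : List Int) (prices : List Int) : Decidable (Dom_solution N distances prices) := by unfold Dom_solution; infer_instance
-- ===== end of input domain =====

-- B replaces A's fused running-min loop (with its N==2 special case and max(prices[:-1]) initializer)
-- by a sort-based segment algorithm: visit stations cheapest-first, each new record (station left of
-- every cheaper one) pays for the stretch of road up to the previous record; equal wherever A returns.


-- ===== PORT A =====
def solution (N : Int) (distances : List Int) (prices : List Int) : Int :=
  if N = 2 then
    PySem.List.pyGetD distances 0 0 * PySem.List.pyGetD prices 0 0
  else
    let minPrice0 := (PySem.List.max? (PySem.List.slice prices none (some (-1))) (fun y => y)).getD 0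
    let st := (PySem.List.pyRange 0 (N - 1) 1).foldl
      (fun (st : Int × Int) i =>
        let dist := PySem.List.pyGetD distances i 0
        let price := PySem.List.pyGetD prices i 0
        let m := if price ≤ st.2 then price else st.2
        (st.1 + dist * m, m)) (0, minPrice0)
    st.1

-- ===== PORT B =====
def solution_alt (N : Int) (distances : List Int) (prices : List Int) : Int :=
  let legs : Int := if 1 < N then N - 1 else 0
  let ds := PySem.List.slice distances none (some legs)
  let order := PySem.List.sorted (PySem.List.pyRange 0 legs 1)
    (fun i => PySem.List.pyGetD prices i 0) false
  let st := order.foldl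
    (fun (st : Int × Int) i =>
      if i < st.2 then
        (st.1 + PySem.List.pyGetD prices i 0 * (PySem.List.slice ds (some i) (some st.2)).sum, i)
      else st) (0, legs)
  st.1

-- ===== PRECONDITION & SPEC =====
-- Pre_ holds exactly where the Python A returns: either the well-formed case (N ≥ 2 with at
-- least N-1 distances and prices) or the degenerate N ≤ 1 with ≥ 2 prices (empty loop, returns 0).
def Pre_solution (N : Int) (distances : List Int) (prices : List Int) : Prop :=
  (2 ≤ N ∧ N - 1 ≤ (distances.length : Int) ∧ N - 1 ≤ (prices.length : Int)) ∨
  (N ≤ 1 ∧ 2 ≤ (prices.length : Int))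
instance (N : Int) (distances : List Int) (prices : List Int) : Decidable (Pre_solution N distances prices) := by unfold Pre_solution; infer_instance
def pvWitness_solution : Int × List Int × List Int := (3, [2, 3], [5, 2, 4])

def Spec_solution (N : Int) (distances : List Int) (prices : List Int) (out : Int) : Prop := out = solution_alt N distances prices
instance (N : Int) (distances : List Int) (prices : List Int) (out : Int) : Decidable (Spec_solution N distances prices out) := by unfold Spec_solution; infer_instance

-- ===== CLAIM (what is proved, stated in full; the proofs are below) =====
def Claim_equal_solution : Prop := ∀ (N : Int) (distances : List Int) (prices : List Int), Dom_solution N distances prices → Pre_solution N distances prices → Spec_solution N distances prices (solution N distances prices)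

-- ===== LEMMAS AND PROOFS =====

-- min of p[0..j] (reference)
def minp : List Int → Nat → Int
  | [], _ => 0
  | x :: _, 0 => x
  | x :: xs, j+1 => min x (minp xs j)

-- reference value: fuel cost of the first f legs, each at its prefix-min price
def msum (d p : List Int) (f : Nat) : Int :=
  ∑ j ∈ Finset.range f, d.getD j 0 * minp p j

-- A's reference loop: fuel cost over parallel lists, carrying a running minimum
def go (m : Int) : List Int → List Int → Int
  | [], _ => 0
  | _ :: _, [] => 0
  | dh :: dt, ph :: pt => dh * min m ph + go (min m ph) dt pt

lemma ite_le_min (p m : Int) : (if p ≤ m then p else m) = min m p := by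
  split_ifs <;> omega

-- A's index loop computes `go` on the suffixes, together with the running minimum
lemma A_loop (d p : List Int) : ∀ (j i : Nat) (a m : Int),
    i + j ≤ d.length → i + j ≤ p.length →
    (PySem.List.pyRange (i : Int) ((i : Int) + (j : Int)) 1).foldl
      (fun (st : Int × Int) t =>
        let dist := PySem.List.pyGetD d t 0
        let price := PySem.List.pyGetD p t 0
        let m := if price ≤ st.2 then price else st.2
        (st.1 + dist * m, m)) (a, m)
    = (a + go m ((d.drop i).take j) ((p.drop i).take j),
       ((p.drop i).take j).foldl min m) := by
  intro j
  induction j with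
  | zero =>
    intro i a m _ _
    rw [PySem.List.pyRange_one_eq_nil (by omega : (i : Int) + ((0 : Nat) : Int) ≤ (i : Int))]
    simp [go]
  | succ j ih =>
    intro i a m hd hp
    rw [PySem.List.pyRange_one_cons (by push_cast; omega)]
    rw [List.foldl_cons]
    have hdi : i < d.length := by omega
    have hpi : i < p.length := by omega
    have hgd : PySem.List.pyGetD d (i : Int) 0 = d[i] := by
      simp [PySem.List.pyGetD_natCast, List.getD, hdi]
    have hgp : PySem.List.pyGetD p (i : Int) 0 = p[i] := by
      simp [PySem.List.pyGetD_natCast, List.getD, hpi]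
    have hstep : ((i : Int) + 1) = ((i + 1 : Nat) : Int) := by push_cast; ring
    have hend : (i : Int) + ((j + 1 : Nat) : Int) = ((i + 1 : Nat) : Int) + (j : Nat) := by
      push_cast; ring
    simp only [hgd, hgp, hend, hstep]
    rw [ih (i + 1) (a + d[i] * (if p[i] ≤ m then p[i] else m))
        (if p[i] ≤ m then p[i] else m) (by omega) (by omega)]
    rw [List.drop_eq_getElem_cons hdi, List.drop_eq_getElem_cons hpi]
    simp only [List.take_succ_cons, go, List.foldl_cons, ite_le_min]
    rw [add_assoc]

-- go is the sum of d_j times the (seeded) prefix minimum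
lemma go_sum : ∀ (q d : List Int) (m : Int),
    go m d q = ∑ j ∈ Finset.range q.length, d.getD j 0 * min m (minp q j) := by
  intro q
  induction q with
  | nil => intro d m; cases d <;> simp [go]
  | cons x xs ih =>
    intro d m
    cases d with
    | nil =>
      simp [go]
    | cons dh dt =>
      simp only [go, List.length_cons, Finset.sum_range_succ']
      rw [ih dt (min m x), add_comm]
      congr 1
      · apply Finset.sum_congr rfl
        intro j _
        simp only [List.getD_cons_succ, minp]
        rw [min_assoc]

lemma minp_le (p : List Int) : ∀ (j k : Nat), k ≤ j → j < p.length → minp p j ≤ p.getD k 0 := by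
  induction p with
  | nil => intro j k _ h; simp at h
  | cons x xs ih =>
    intro j k hk hj
    cases j with
    | zero =>
      interval_cases k
      simp [minp, List.getD]
    | succ j =>
      cases k with
      | zero => simp [minp, List.getD]
      | succ k =>
        simp only [minp, List.getD_cons_succ]
        have hj' : j < xs.length := by simp at hj; omega
        exact le_trans (min_le_right _ _) (ih j k (by omega) hj')

lemma minp_mem (p : List Int) : ∀ (j : Nat), j < p.length → ∃ k, k ≤ j ∧ minp p j = p.getD k 0 := by
  induction p with
  | nil => intro j h; simp at h
  | cons x xs ih =>
    intro j hj
    cases j with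
    | zero => exact ⟨0, le_refl _, by simp [minp, List.getD]⟩
    | succ j =>
      by_cases hx : x ≤ minp xs j
      · exact ⟨0, by omega, by simp [minp, List.getD, min_eq_left hx]⟩
      · obtain ⟨k, hk, he⟩ := ih j (by simp at hj; omega)
        exact ⟨k + 1, by omega,
          by simp only [minp, List.getD_cons_succ, min_eq_right (le_of_not_ge hx)]; exact he⟩

-- if p[i] is ≤ every p[k] for k ≤ j and i ≤ j, the prefix minimum at j is p[i]
lemma minp_eq (p : List Int) (i j : Nat) (hij : i ≤ j) (hj : j < p.length)
    (hmin : ∀ k, k ≤ j → p.getD i 0 ≤ p.getD k 0) : minp p j = p.getD i 0 := by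
  obtain ⟨k, hk, he⟩ := minp_mem p j hj
  have h1 := minp_le p j i hij hj
  have h2 := hmin k hk
  omega

lemma getD_take (xs : List Int) (n j : Nat) (h : j < n) :
    (xs.take n).getD j 0 = xs.getD j 0 := by
  simp [List.getD, h]

lemma sum_drop_take (xs : List Int) (a : Nat) : ∀ (c : Nat),
    ((xs.drop a).take c).sum = ∑ j ∈ Finset.range c, xs.getD (a + j) 0 := by
  intro c
  induction c with
  | zero => simp
  | succ c ih =>
    rw [List.take_add_one, List.sum_append, ih, Finset.sum_range_succ]
    congr 1
    rw [List.getElem?_drop]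
    cases h : xs[a + c]? with
    | none => simp [List.getD, h]
    | some v => simp [List.getD, h]

-- the cheapest-first scan: invariant over the remaining (still price-sorted) index list.
-- f is the current frontier (min index already processed; n = no index yet), total the cost paid.
lemma scan_inv (d p : List Int) (n : Nat) (hnp : n ≤ p.length) :
    ∀ (S : List Int) (f : Nat) (total : Int), f ≤ n →
    (∀ k : Nat, k < f → (k : Int) ∈ S) →
    (∀ i ∈ S, 0 ≤ i ∧ i < (n : Int)) →
    S.Pairwise (fun a b => PySem.List.pyGetD p a 0 ≤ PySem.List.pyGetD p b 0) →
    (S.foldl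
      (fun (st : Int × Int) i =>
        if i < st.2 then
          (st.1 + PySem.List.pyGetD p i 0 *
            (PySem.List.slice (d.take n) (some i) (some st.2)).sum, i)
        else st) (total, (f : Int))).1 = total + msum d (p.take n) f := by
  intro S
  induction S with
  | nil =>
    intro f total hf hcov _ _
    have hf0 : f = 0 := by
      by_contra h
      exact absurd (hcov (f - 1) (by omega)) (List.not_mem_nil)
    subst hf0
    simp [msum]
  | cons i S' ih =>
    intro f total hf hcov hel hpw
    have hi := hel i (List.mem_cons_self)
    simp only [List.foldl_cons]
    by_cases hif : i < (f : Int)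
    · -- i is a new record: pay for legs i..f-1, frontier moves to i
      rw [if_pos hif]
      obtain ⟨iN, rfl⟩ : ∃ iN : Nat, i = (iN : Nat) := ⟨i.toNat, by omega⟩
      have hiNf : iN < f := by exact_mod_cast hif
      -- the slice is drop/take, its sum a range sum
      rw [PySem.List.slice_toNat _ (by positivity) (by positivity), Int.toNat_natCast,
        Int.toNat_natCast, sum_drop_take]
      -- recurse with frontier iN
      rw [ih iN _ (by omega)
        (fun k hk => by
          have := hcov k (by omega)
          rcases List.mem_cons.mp this with h | h
          · exact absurd (by exact_mod_cast h : k = iN) (by omega)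
          · exact h)
        (fun x hx => hel x (List.mem_cons_of_mem _ hx))
        hpw.tail]
      -- arithmetic: msum f = msum iN + p[iN] * (distance of legs iN..f-1)
      have hgp : PySem.List.pyGetD p (iN : Int) 0 = (p.take n).getD iN 0 := by
        have : iN < p.length := by omega
        simp [PySem.List.pyGetD_natCast, List.getD, this, hiNf.trans_le hf]
      have hmin : ∀ j, iN ≤ j → j < f → minp (p.take n) j = (p.take n).getD iN 0 := by
        intro j hij hjf
        apply minp_eq (p.take n) iN j hij (by simp [List.length_take]; omega)
        intro k hkj
        have hkf : k < f := by omega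
        by_cases hk : k = iN
        · subst hk; exact le_refl _
        · have hmem := hcov k hkf
          rcases List.mem_cons.mp hmem with h | h
          · exact absurd (by exact_mod_cast h : k = iN) hk
          · have := (List.pairwise_cons.mp hpw).1 _ h
            have hk' : k < p.length := by omega
            have hgk : PySem.List.pyGetD p (k : Int) 0 = (p.take n).getD k 0 := by
              simp [PySem.List.pyGetD_natCast, List.getD, hk', hkf.trans_le hf]
            rw [← hgp, ← hgk]
            exact this
      have hsplit : msum d (p.take n) f
          = msum d (p.take n) iN
            + (p.take n).getD iN 0 * ∑ j ∈ Finset.range (f - iN), d.getD (iN + j) 0 := by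
        unfold msum
        rw [Finset.range_eq_Ico, ← Finset.sum_Ico_consecutive _ (Nat.zero_le iN) (le_of_lt hiNf),
          ← Finset.range_eq_Ico, Finset.sum_Ico_eq_sum_range]
        rw [Finset.mul_sum]
        congr 1
        apply Finset.sum_congr rfl
        intro j hj
        simp only [Finset.mem_range] at hj
        rw [hmin (iN + j) (by omega) (by omega), mul_comm]
      rw [hsplit, hgp]
      have hdeq : ∀ j ∈ Finset.range (f - iN), (d.take n).getD (iN + j) 0 = d.getD (iN + j) 0 := by
        intro j hj
        simp only [Finset.mem_range] at hj
        exact getD_take d n (iN + j) (by omega)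
      rw [Finset.sum_congr rfl hdeq]
      ring
    · -- i is right of the frontier: skipped
      rw [if_neg hif]
      exact ih f total hf
        (fun k hk => by
          have hmem := hcov k hk
          rcases List.mem_cons.mp hmem with h | h
          · exact absurd h (by intro he; apply hif; rw [← he]; exact_mod_cast hk)
          · exact h)
        (fun x hx => hel x (List.mem_cons_of_mem _ hx))
        hpw.tail

-- B evaluated with legs = n on sufficiently long lists is msum
lemma B_eval (d p : List Int) (n : Nat) (hnp : n ≤ p.length) :
    ((PySem.List.sorted (PySem.List.pyRange 0 (n : Int) 1)
        (fun i => PySem.List.pyGetD p i 0) false).foldl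
      (fun (st : Int × Int) i =>
        if i < st.2 then
          (st.1 + PySem.List.pyGetD p i 0 *
            (PySem.List.slice (PySem.List.slice d none (some (n : Int))) (some i) (some st.2)).sum, i)
        else st) (0, (n : Int))).1 = msum d (p.take n) n := by
  rw [PySem.List.slice_to d (by positivity), Int.toNat_natCast]
  have := scan_inv d p n hnp
    (PySem.List.sorted (PySem.List.pyRange 0 (n : Int) 1)
      (fun i => PySem.List.pyGetD p i 0) false) n 0 (le_refl n)
    (fun k hk => by
      rw [PySem.List.mem_sorted, PySem.List.mem_pyRange_one]
      constructor <;> [positivity; exact_mod_cast hk])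
    (fun i hi => by
      rw [PySem.List.mem_sorted, PySem.List.mem_pyRange_one] at hi
      exact hi)
    (PySem.List.sorted_pairwise _ _)
  rw [this, zero_add]

-- ===== VERDICT (by name: the statement is the Claim_ definition above) =====
theorem solution_spec : Claim_equal_solution := by
  intro N d p _ hpre
  unfold Spec_solution
  simp only [solution, solution_alt]
  rcases hpre with ⟨h2, hd, hp⟩ | ⟨h1, hp⟩
  · -- N ≥ 2: both sides equal msum d (p.take k) k with k = N - 1
    obtain ⟨k, hkI⟩ : ∃ k : Nat, (k : Int) = N - 1 := ⟨(N - 1).toNat, by omega⟩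
    have hk1 : 1 ≤ k := by omega
    have hkd : k ≤ d.length := by omega
    have hkp : k ≤ p.length := by omega
    have hlegs : (if 1 < N then N - 1 else 0) = (k : Int) := by
      rw [if_pos (by omega : (1 : Int) < N)]; omega
    rw [hlegs, B_eval d p k hkp]
    by_cases hN2 : N = 2
    · -- A's special branch: one leg at the first price
      subst hN2
      have hk : k = 1 := by omega
      subst hk
      obtain ⟨d0, dt, rfl⟩ : ∃ d0 dt, d = d0 :: dt := by
        cases d with
        | nil => simp at hkd
        | cons a t => exact ⟨a, t, rfl⟩
      obtain ⟨p0, pt, rfl⟩ : ∃ p0 pt, p = p0 :: pt := by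
        cases p with
        | nil => simp at hkp
        | cons a t => exact ⟨a, t, rfl⟩
      rw [if_pos rfl]
      simp [msum, minp, List.getD, PySem.List.pyGetD]
    · -- general branch
      rw [if_neg hN2]
      have hk2 : 2 ≤ k := by omega
      obtain ⟨p0, p1, pt, rfl⟩ : ∃ p0 p1 pt, p = p0 :: p1 :: pt := by
        cases p with
        | nil => exfalso; simp at hkp; omega
        | cons a t =>
          cases t with
          | nil => exfalso; simp at hkp; omega
          | cons b t2 => exact ⟨a, b, t2, rfl⟩
      rw [PySem.List.slice_to_neg_one]
      obtain ⟨M, hM⟩ : ∃ M, PySem.List.max? ((p0 :: p1 :: pt).dropLast) (fun y => y) = some M := by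
        rcases h : PySem.List.max? ((p0 :: p1 :: pt).dropLast) (fun y => y) with _ | M
        · rw [PySem.List.max?_eq_none_iff] at h
          simp [List.dropLast_cons₂] at h
        · exact ⟨M, rfl⟩
      have hp0M : p0 ≤ M :=
        PySem.List.max?_isMax hM p0 (by simp [List.dropLast_cons₂])
      rw [hM]
      simp only [Option.getD_some]
      have hr : PySem.List.pyRange 0 (N - 1) 1
          = PySem.List.pyRange ((0 : Nat) : Int) (((0 : Nat) : Int) + (k : Int)) 1 := by
        rw [← hkI]; norm_num
      rw [hr, A_loop (d := d) (p := p0 :: p1 :: pt) k 0 0 M (by omega) (by omega)]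
      simp only [List.drop_zero]
      rw [go_sum]
      have hlenp : (((p0 :: p1 :: pt).take k).length) = k := by
        rw [List.length_take]; exact min_eq_left hkp
      rw [hlenp, zero_add]
      unfold msum
      apply Finset.sum_congr rfl
      intro j hj
      simp only [Finset.mem_range] at hj
      rw [getD_take d k j hj]
      have h1 : minp ((p0 :: p1 :: pt).take k) j ≤ ((p0 :: p1 :: pt).take k).getD 0 0 :=
        minp_le _ j 0 (Nat.zero_le j) (by rw [hlenp]; exact hj)
      have h2 : (((p0 :: p1 :: pt).take k).getD 0 0) = p0 := by
        rw [getD_take _ k 0 (by omega)]; rfl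
      rw [min_eq_right (by rw [h2] at h1; exact le_trans h1 hp0M)]
  · -- N ≤ 1: empty loop on both sides
    rw [if_neg (by omega : ¬ N = 2)]
    rw [PySem.List.pyRange_one_eq_nil (by omega : N - 1 ≤ 0)]
    rw [if_neg (by omega : ¬ (1 : Int) < N)]
    have hB := B_eval d p 0 (Nat.zero_le _)
    simp only [Nat.cast_zero] at hB
    rw [hB]
    simp [msum]
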